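-- pv_equiv track=rewrite | github.com/Roktar/codewars | lang/python/N%/Numbers_in_strings.py | solve
-- ===== SOURCE A (Python) =====
-- def solve(s) :
--     arr = list()
--     sub = ""
--
--     for d in s :
--         if ord(d) >= 48 and ord(d) <= 57 :
--             sub += d
--             continue
--         arr.append(sub)
--         sub = ""
--     arr.append(sub)
--
--     while True :
--         if '' in arr :
--             arr.remove('')
--         else:
--             break
--
--     max = 0
--     for no in arr :
--         if int(no) > max :
--             max = int(no)
--     return max
-- ===== SOURCE B (Python) =====
-- def solve(s):
--     best = cur = 0
--     for d in s:
--         if '0' <= d <= '9':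
--             cur = cur * 10 + (ord(d) - 48)
--             if cur > best:
--                 best = cur
--         else:
--             cur = 0
--     return best
-- ===== Notes on version B (the rewrite author's own statement) =====
-- stated objective: faster
-- what changed: Single pass over the string maintaining the current digit-run value and the running maximum, instead of building a list of run substrings, repeatedly scanning/removing empty entries, and re-parsing each run with int().
import Mathlib
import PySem

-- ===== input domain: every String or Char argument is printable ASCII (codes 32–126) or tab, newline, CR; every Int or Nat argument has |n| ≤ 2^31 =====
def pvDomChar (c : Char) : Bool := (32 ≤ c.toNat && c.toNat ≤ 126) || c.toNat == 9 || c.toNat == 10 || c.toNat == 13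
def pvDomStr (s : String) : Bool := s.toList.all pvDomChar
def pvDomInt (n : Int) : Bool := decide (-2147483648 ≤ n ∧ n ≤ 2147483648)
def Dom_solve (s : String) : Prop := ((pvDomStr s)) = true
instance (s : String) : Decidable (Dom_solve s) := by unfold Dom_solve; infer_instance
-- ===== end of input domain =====

-- B replaces A's list-of-runs + repeated ''-removal + re-parse with one pass holding the
-- current run value and the running maximum (measured faster; same return value everywhere).

-- ===== PORT A =====
-- int(no): hand-ported Horner evaluation of the decimal digits; exact for every string A
-- feeds to int() (after the ''-removal loop, arr holds only nonempty ASCII digit runs,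
-- and on those int() is exactly this fold; PySem.Int.ofStr? agrees there).
def pyIntDigits (no : String) : Int :=
  no.toList.foldl (fun a c => a * 10 + ((c.toNat : Int) - 48)) 0

-- the body of A's first loop: grow sub on a digit, else flush sub into arr
def aSplitStep (p : List String × String) (d : Char) : List String × String :=
  if 48 ≤ d.toNat ∧ d.toNat ≤ 57 then (p.1, p.2.push d) else (p.1 ++ [p.2], "")

-- the body of A's last loop: max = int(no) if int(no) > max
def aMaxStep (m : Int) (no : String) : Int :=
  if pyIntDigits no > m then pyIntDigits no else m

-- A's `while True: if '' in arr: arr.remove('') else: break`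
def removeEmptiesA (arr : List String) : List String :=
  match h : PySem.List.remove? arr "" with
  | some a => removeEmptiesA a
  | none => arr
termination_by arr.length
decreasing_by
  have hm : "" ∈ arr := by
    by_contra hn
    rw [(PySem.List.remove?_eq_none_iff arr "").mpr hn] at h
    cases h
  rw [PySem.List.remove?_eq_some_erase arr "" hm] at h
  cases h
  have := List.length_erase_of_mem hm
  have : 0 < arr.length := List.length_pos_of_mem hm
  omega

def solve (s : String) : Int :=
  let st := s.toList.foldl aSplitStep ([], "")
  let arr := removeEmptiesA (st.1 ++ [st.2])
  arr.foldl aMaxStep 0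

-- ===== PORT B =====
-- the body of B's single loop over the state (cur, best)
def bStep (p : Int × Int) (d : Char) : Int × Int :=
  if '0' ≤ d ∧ d ≤ '9' then
    let cur := p.1 * 10 + ((d.toNat : Int) - 48)
    (cur, if cur > p.2 then cur else p.2)
  else (0, p.2)

def solve_alt (s : String) : Int :=
  (s.toList.foldl bStep (0, 0)).2

-- ===== PRECONDITION & SPEC =====
def Spec_solve (s : String) (out : Int) : Prop := out = solve_alt s
instance (s : String) (out : Int) : Decidable (Spec_solve s out) := by unfold Spec_solve; infer_instance

-- ===== CLAIM (what is proved, stated in full; the proofs are below) =====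
def Claim_equal_solve : Prop := ∀ (s : String), Dom_solve s → Spec_solve s (solve s)

-- ===== LEMMAS AND PROOFS =====

-- the digit runs of cs when the current run so far is sub (A's arr ++ [sub], abstractly)
def runsA : List Char → String → List String
  | [], sub => [sub]
  | c :: cs, sub =>
      if 48 ≤ c.toNat ∧ c.toNat ≤ 57 then runsA cs (sub.push c) else sub :: runsA cs ""

theorem split_runs (cs : List Char) : ∀ (arr : List String) (sub : String),
    (cs.foldl aSplitStep (arr, sub)).1 ++ [(cs.foldl aSplitStep (arr, sub)).2]
      = arr ++ runsA cs sub := by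
  induction cs with
  | nil => intro arr sub; simp [runsA]
  | cons c cs ih =>
      intro arr sub
      simp only [List.foldl_cons, aSplitStep, runsA]
      by_cases h : 48 ≤ c.toNat ∧ c.toNat ≤ 57
      · simp [h, ih]
      · simp [h, ih]

theorem erase_filter (l : List String) :
    (l.erase "").filter (fun x => !(x == "")) = l.filter (fun x => !(x == "")) := by
  induction l with
  | nil => rfl
  | cons x xs ih =>
      by_cases h : x = ""
      · subst h
        simp only [List.erase_cons, beq_self_eq_true, if_true, List.filter_cons,
          Bool.not_true, Bool.false_eq_true]
        rfl
      · have hb : (x == "") = false := beq_eq_false_iff_ne.mpr h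
        simp only [List.erase_cons, hb, Bool.false_eq_true, if_false, List.filter_cons,
          Bool.not_false, if_true, ih]

theorem removeEmptiesA_eq_filter (l : List String) :
    removeEmptiesA l = l.filter (fun x => !(x == "")) := by
  induction hl : l.length using Nat.strong_induction_on generalizing l with
  | _ n ih =>
    rw [removeEmptiesA]
    split
    · next a h =>
        have hm : "" ∈ l := by
          by_contra hn
          rw [(PySem.List.remove?_eq_none_iff l "").mpr hn] at h
          cases h
        rw [PySem.List.remove?_eq_some_erase l "" hm] at h
        cases h
        have h1 : (l.erase "").length < n := by
          have := List.length_erase_of_mem hm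
          have := List.length_pos_of_mem hm
          omega
        rw [ih _ h1 _ rfl, erase_filter]
    · next h =>
        have hn : "" ∉ l := (PySem.List.remove?_eq_none_iff l "").mp h
        symm
        apply List.filter_eq_self.mpr
        intro a ha
        have : (a == "") = false := beq_eq_false_iff_ne.mpr (fun hv => hn (by rwa [hv] at ha))
        simp [this]

theorem pyIntDigits_push (sub : String) (c : Char) :
    pyIntDigits (sub.push c) = pyIntDigits sub * 10 + ((c.toNat : Int) - 48) := by
  simp [pyIntDigits, String.toList_push]

theorem pyIntDigits_empty : pyIntDigits "" = 0 := rfl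

theorem aMaxStep_nonneg (m : Int) (no : String) (hm : 0 ≤ m) : 0 ≤ aMaxStep m no := by
  unfold aMaxStep; split_ifs with h <;> omega

theorem foldl_max_filter (l : List String) : ∀ (m : Int), 0 ≤ m →
    (l.filter (fun x => !(x == ""))).foldl aMaxStep m = l.foldl aMaxStep m := by
  induction l with
  | nil => intro m _; rfl
  | cons x xs ih =>
      intro m hm
      by_cases h : x = ""
      · subst h
        have hstep : aMaxStep m "" = m := by
          unfold aMaxStep; rw [pyIntDigits_empty]; split_ifs with h' <;> omega
        simp only [List.filter_cons, beq_self_eq_true, Bool.not_true, Bool.false_eq_true,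
          if_false, List.foldl_cons, hstep]
        exact ih m hm
      · have hb : (x == "") = false := beq_eq_false_iff_ne.mpr h
        simp only [List.filter_cons, hb, Bool.not_false, if_true, List.foldl_cons]
        exact ih _ (aMaxStep_nonneg m x hm)

-- the B-side digit test is the same condition as A's ord-based one
theorem digit_cond (d : Char) : ('0' ≤ d ∧ d ≤ '9') ↔ (48 ≤ d.toNat ∧ d.toNat ≤ 57) := by
  simp only [Char.le_def, UInt32.le_iff_toNat_le, Char.toNat,
    show ('0'.val.toNat = 48) from rfl, show ('9'.val.toNat = 57) from rfl]

-- absorbing aMaxStep of the pending run into the accumulator does not change the fold: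
-- the run list starting from sub begins with an extension of sub, whose value is at least as big
theorem absorb (cs : List Char) : ∀ (sub : String) (m : Int), 0 ≤ pyIntDigits sub →
    (runsA cs sub).foldl aMaxStep m = (runsA cs sub).foldl aMaxStep (aMaxStep m sub) := by
  induction cs with
  | nil =>
      intro sub m _
      simp only [runsA, List.foldl_cons, List.foldl_nil]
      unfold aMaxStep; split_ifs <;> omega
  | cons c cs ih =>
      intro sub m hsub
      simp only [runsA]
      by_cases h : 48 ≤ c.toNat ∧ c.toNat ≤ 57
      · simp only [h, and_self, if_true]
        have hd : (0 : Int) ≤ (c.toNat : Int) - 48 := by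
          have := h.1; omega
        have hpush := pyIntDigits_push sub c
        have hsub' : 0 ≤ pyIntDigits (sub.push c) := by omega
        have hle : pyIntDigits sub ≤ pyIntDigits (sub.push c) := by omega
        rw [ih (sub.push c) m hsub', ih (sub.push c) (aMaxStep m sub) hsub']
        have : aMaxStep m (sub.push c) = aMaxStep (aMaxStep m sub) (sub.push c) := by
          unfold aMaxStep; split_ifs <;> omega
        rw [this]
      · simp only [h, if_false, List.foldl_cons]
        have : aMaxStep (aMaxStep m sub) sub = aMaxStep m sub := by
          unfold aMaxStep; split_ifs <;> omega
        rw [this]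

-- the core invariant: folding aMaxStep over the runs equals B's loop on (cur, best)
theorem main_inv (cs : List Char) : ∀ (sub : String) (m : Int),
    0 ≤ pyIntDigits sub → pyIntDigits sub ≤ m →
    (runsA cs sub).foldl aMaxStep m = (cs.foldl bStep (pyIntDigits sub, m)).2 := by
  induction cs with
  | nil =>
      intro sub m _ hle
      simp only [runsA, List.foldl_cons, List.foldl_nil]
      unfold aMaxStep; split_ifs <;> omega
  | cons c cs ih =>
      intro sub m hsub hle
      simp only [runsA, List.foldl_cons, bStep]
      by_cases h : 48 ≤ c.toNat ∧ c.toNat ≤ 57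
      · simp only [and_self, if_true, digit_cond c, h]
        have hd : (0 : Int) ≤ (c.toNat : Int) - 48 := by
          have := h.1; omega
        have hpush := pyIntDigits_push sub c
        have hsub' : 0 ≤ pyIntDigits (sub.push c) := by omega
        have heq : pyIntDigits sub * 10 + ((c.toNat : Int) - 48) = pyIntDigits (sub.push c) := by
          omega
        rw [heq]
        have hm' : pyIntDigits (sub.push c) ≤
            (if pyIntDigits (sub.push c) > m then pyIntDigits (sub.push c) else m) := by
          split_ifs <;> omega
        rw [← ih (sub.push c) _ hsub' hm']
        rw [absorb cs (sub.push c) m hsub']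
        have : aMaxStep m (sub.push c)
            = (if pyIntDigits (sub.push c) > m then pyIntDigits (sub.push c) else m) := by
          unfold aMaxStep; split_ifs <;> omega
        rw [this]
      · have h' : ¬ ('0' ≤ c ∧ c ≤ '9') := by rw [digit_cond]; exact h
        simp only [h, if_false, h', List.foldl_cons]
        have : aMaxStep m sub = m := by unfold aMaxStep; split_ifs <;> omega
        rw [this, ← pyIntDigits_empty]
        exact ih "" m (by rw [pyIntDigits_empty]) (by rw [pyIntDigits_empty]; omega)

-- ===== VERDICT (by name: the statement is the Claim_ definition above) =====
theorem solve_spec : Claim_equal_solve := by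
  intro s _
  unfold Spec_solve solve solve_alt
  simp only
  rw [removeEmptiesA_eq_filter, split_runs s.toList [] "", List.nil_append,
      foldl_max_filter (runsA s.toList "") 0 le_rfl,
      main_inv s.toList "" 0 (by rw [pyIntDigits_empty]) (by rw [pyIntDigits_empty])]
  rfl
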